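-- pv_equiv track=rewrite | github.com/DailyCommitStudy/Lims-practice-repository | programmers/코딩 기초 트레이닝/day20_3.py | solution
-- ===== SOURCE A (Python) =====
-- def solution(strArr):
--     answer = []
--     a = []
--     for i in strArr:
--         a.append(len(i))      # 길이를 먼저 넣기
--     for i in set(a):          # 중복을 제거함 (1, 2, 3, 3, 2)이면 1, 2, 3
--         answer.append(a.count(i))   # a에서 해당 값 카운트해서 추가하기
--     return max(answer)
-- ===== SOURCE B (Python) =====
-- def solution(strArr):
--     ls = sorted(len(s) for s in strArr)
--     runs = []
--     prev = None
--     for x in ls: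
--         if prev is not None and x == prev:
--             runs[-1] += 1
--         else:
--             runs.append(1)
--         prev = x
--     return max(runs)
-- ===== Notes on version B (the rewrite author's own statement) =====
-- stated objective: alternative
-- what changed: A counts each distinct length by a full list.count scan over the length list; B sorts the lengths once and takes the max over run-lengths of equal consecutive values in a single scan.
-- outside the precondition, e.g. on solution([]): A raises ValueError, B raises ValueError
import Mathlib
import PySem

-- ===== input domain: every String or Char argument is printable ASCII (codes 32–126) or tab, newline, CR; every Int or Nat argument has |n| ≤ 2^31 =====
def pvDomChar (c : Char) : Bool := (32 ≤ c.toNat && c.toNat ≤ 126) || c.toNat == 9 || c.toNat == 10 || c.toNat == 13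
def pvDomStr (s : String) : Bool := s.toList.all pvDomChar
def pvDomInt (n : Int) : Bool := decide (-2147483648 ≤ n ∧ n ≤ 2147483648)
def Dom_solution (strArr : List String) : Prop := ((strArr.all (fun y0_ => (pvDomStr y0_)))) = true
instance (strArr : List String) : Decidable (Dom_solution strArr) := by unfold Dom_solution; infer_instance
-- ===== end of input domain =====

-- B sorts the string lengths once and takes the max over the lengths of runs of equal
-- consecutive values, instead of A's per-distinct-value counting scans.

-- ===== PORT A =====
def solution (strArr : List String) : Int :=
  let a : List Int := strArr.foldl (fun acc i => acc ++ [PySem.Str.len i]) []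
  let answer : List Int := (PySem.Set.ofList a).foldl (fun acc i => acc ++ [(a.count i : Int)]) []
  (PySem.List.max? answer (fun x => x)).getD 0   -- max(answer); Pre_ excludes [], where Python raises ValueError

-- ===== PORT B =====
-- runs[-1] += 1 on a nonempty list
def bumpLast : List Int → List Int
  | [] => []
  | [r] => [r + 1]
  | r :: rs => r :: bumpLast rs

def solution_alt (strArr : List String) : Int :=
  let ls := PySem.List.sorted (strArr.map (fun s => PySem.Str.len s)) (fun x => x) false
  let st := ls.foldl
    (fun (st : Option Int × List Int) x =>
      if st.1 = some x then (some x, bumpLast st.2) else (some x, st.2 ++ [1]))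
    (none, [])
  (PySem.List.max? st.2 (fun y => y)).getD 0   -- max(runs); Pre_ excludes [], where Python raises ValueError

-- ===== PRECONDITION & SPEC =====
-- Pre_ excludes exactly the empty list, on which both A and B raise ValueError (max of an empty sequence).
def Pre_solution (strArr : List String) : Prop := strArr ≠ []
instance (strArr : List String) : Decidable (Pre_solution strArr) := by unfold Pre_solution; infer_instance
def pvWitness_solution : List String := (["a", "bb", "c"])

def Spec_solution (strArr : List String) (out : Int) : Prop := out = solution_alt strArr
instance (strArr : List String) (out : Int) : Decidable (Spec_solution strArr out) := by unfold Spec_solution; infer_instance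

-- ===== CLAIM (what is proved, stated in full; the proofs are below) =====
def Claim_equal_solution : Prop := ∀ (strArr : List String), Dom_solution strArr → Pre_solution strArr → Spec_solution strArr (solution strArr)

-- ===== LEMMAS AND PROOFS =====

theorem bumpLast_append (ys : List Int) (r : Int) : bumpLast (ys ++ [r]) = ys ++ [r + 1] := by
  induction ys with
  | nil => rfl
  | cons y ys ih =>
    cases ys with
    | nil => rfl
    | cons z zs => simpa [bumpLast] using ih

-- dedup of a snoc
theorem dedup_append_singleton (ls : List Int) (x : Int) :
    PySem.List.dedup (ls ++ [x]) =
      (if x ∈ ls then PySem.List.dedup ls else PySem.List.dedup ls ++ [x]) := by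
  simp only [PySem.List.dedup_eq_ofList]
  rw [PySem.Set.ofList_eq_foldl, List.foldl_append, ← PySem.Set.ofList_eq_foldl]
  simp [PySem.Set.add, PySem.Set.contains]

-- B's loop on a ≤-sorted list: prev is the last element, and the run lengths are the
-- multiplicities of the distinct values in first-occurrence order.
theorem runs_spec (ls : List Int) (h : ls.Pairwise (· ≤ ·)) :
    ls.foldl
      (fun (st : Option Int × List Int) x =>
        if st.1 = some x then (some x, bumpLast st.2) else (some x, st.2 ++ [1]))
      (none, [])
      = (ls.getLast?, (PySem.List.dedup ls).map (fun v => (ls.count v : Int)))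
    ∧ (PySem.List.dedup ls).getLast? = ls.getLast? := by
  induction ls using List.reverseRecOn with
  | nil => constructor <;> rfl
  | append_singleton ls x ih =>
    obtain ⟨h', -, h3⟩ := List.pairwise_append.mp h
    obtain ⟨ih1, ih2⟩ := ih h'
    have h3' : ∀ y ∈ ls, y ≤ x := by intro y hy; exact h3 y hy x (by simp)
    rw [List.foldl_append, ih1]
    simp only [List.foldl_cons, List.foldl_nil]
    by_cases hx : ls.getLast? = some x
    · -- x equals the previous (last) element: bump the last run
      have hxls : x ∈ ls := List.mem_of_getLast? hx
      have hded : PySem.List.dedup (ls ++ [x]) = PySem.List.dedup ls := by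
        rw [dedup_append_singleton, if_pos hxls]
      have hmem : x ∈ (PySem.List.dedup ls).getLast? := by rw [ih2, hx]; rfl
      have hd : (PySem.List.dedup ls).dropLast ++ [x] = PySem.List.dedup ls :=
        List.dropLast_append_getLast? x hmem
      have hnd : x ∉ (PySem.List.dedup ls).dropLast := by
        have := PySem.List.nodup_dedup ls
        rw [← hd] at this
        have h2 : ∀ a ∈ (PySem.List.dedup ls).dropLast, ¬ a = x := by
          simpa using (List.nodup_append.mp this).2.2
        exact fun hm => h2 x hm rfl
      have hmap : (PySem.List.dedup (ls ++ [x])).map (fun v => ((ls ++ [x]).count v : Int))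
          = bumpLast ((PySem.List.dedup ls).map (fun v => (ls.count v : Int))) := by
        rw [hded, ← hd, List.map_append, List.map_append, List.map_singleton,
          List.map_singleton, bumpLast_append]
        congr 1
        · apply List.map_congr_left
          intro v hv
          have hvx : v ≠ x := fun e => hnd (e ▸ hv)
          have h0 : List.count v [x] = 0 := List.count_eq_zero.mpr (by simp [hvx])
          simp [List.count_append, h0]
        · simp [List.count_append]
      rw [if_pos hx]
      refine ⟨?_, ?_⟩
      · rw [List.getLast?_concat, hmap]
      · rw [hded, ih2, hx, List.getLast?_concat]
    · -- new value: start a run of length 1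
      have hxls : x ∉ ls := by
        intro hmem
        cases hls : ls.getLast? with
        | none => simp [List.getLast?_eq_none_iff.mp hls] at hmem
        | some p =>
          have hpls : p ∈ ls := List.mem_of_getLast? hls
          have hmem' : p ∈ ls.getLast? := by rw [hls]; rfl
          have hdp : ls.dropLast ++ [p] = ls := List.dropLast_append_getLast? p hmem'
          have hxp : x ≤ p := by
            rw [← hdp] at hmem
            rcases List.mem_append.mp hmem with hm | hm
            · obtain ⟨-, -, hle⟩ := List.pairwise_append.mp (hdp ▸ h')
              exact hle x hm p (by simp)
            · simp at hm; omega
          have hpx : p ≤ x := h3' p hpls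
          have : p = x := le_antisymm hpx hxp
          exact hx (hls.trans (by rw [this]))
      have hded : PySem.List.dedup (ls ++ [x]) = PySem.List.dedup ls ++ [x] := by
        rw [dedup_append_singleton, if_neg hxls]
      have hmap : (PySem.List.dedup (ls ++ [x])).map (fun v => ((ls ++ [x]).count v : Int))
          = (PySem.List.dedup ls).map (fun v => (ls.count v : Int)) ++ [1] := by
        rw [hded, List.map_append, List.map_singleton]
        congr 1
        · apply List.map_congr_left
          intro v hv
          have hvls : v ∈ ls := (PySem.List.mem_dedup _ _).mp hv
          have hvx : v ≠ x := fun e => hxls (e ▸ hvls)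
          have h0 : List.count v [x] = 0 := List.count_eq_zero.mpr (by simp [hvx])
          simp [List.count_append, h0]
        · simp [List.count_append, List.count_eq_zero_of_not_mem hxls]
      rw [if_neg hx]
      refine ⟨?_, ?_⟩
      · rw [List.getLast?_concat, hmap]
      · rw [hded, List.getLast?_concat, List.getLast?_concat]

-- max over a list of Ints is invariant under permutation
theorem max?_id_eq_of_perm {l₁ l₂ : List Int} (h : l₁.Perm l₂) :
    PySem.List.max? l₁ (fun x => x) = PySem.List.max? l₂ (fun x => x) := by
  cases e1 : PySem.List.max? l₁ (fun x => x) with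
  | none =>
    rw [PySem.List.max?_eq_none_iff _ _] at e1
    subst e1
    exact ((PySem.List.max?_eq_none_iff _ _).mpr h.nil_eq.symm).symm
  | some m1 =>
    cases e2 : PySem.List.max? l₂ (fun x => x) with
    | none =>
      rw [PySem.List.max?_eq_none_iff _ _] at e2
      subst e2
      rw [h.eq_nil] at e1
      rw [show PySem.List.max? ([] : List Int) (fun x => x) = none from rfl] at e1
      exact absurd e1 (by simp)
    | some m2 =>
      have hm1 := PySem.List.max?_mem e1
      have hm2 := PySem.List.max?_mem e2
      have h12 := PySem.List.max?_isMax e1 m2 (h.mem_iff.mpr hm2)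
      have h21 := PySem.List.max?_isMax e2 m1 (h.mem_iff.mp hm1)
      exact congrArg some (le_antisymm h21 h12)

theorem solution_eq_alt (strArr : List String) : solution strArr = solution_alt strArr := by
  unfold solution solution_alt
  simp only [PySem.List.foldl_append_singleton_eq_map, List.nil_append]
  set a := strArr.map (fun s => PySem.Str.len s) with ha
  have hsp : (PySem.List.sorted a (fun x => x) false).Perm a := PySem.List.sorted_perm a _ _
  have hpw : (PySem.List.sorted a (fun x => x) false).Pairwise (· ≤ ·) := by
    simpa using PySem.List.sorted_pairwise a (fun x => x)
  rw [(runs_spec _ hpw).1]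
  have hcnt : (PySem.List.dedup (PySem.List.sorted a (fun x => x) false)).map
        (fun v => ((PySem.List.sorted a (fun x => x) false).count v : Int))
      = (PySem.List.dedup (PySem.List.sorted a (fun x => x) false)).map
        (fun v => (a.count v : Int)) := by
    apply List.map_congr_left
    intro v _
    rw [hsp.count_eq]
  rw [hcnt]
  have hperm : (PySem.Set.ofList a).Perm (PySem.List.dedup (PySem.List.sorted a (fun x => x) false)) := by
    rw [← PySem.List.dedup_eq_ofList]
    apply (List.perm_ext_iff_of_nodup (PySem.List.nodup_dedup _) (PySem.List.nodup_dedup _)).mpr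
    intro v
    rw [PySem.List.mem_dedup, PySem.List.mem_dedup, PySem.List.mem_sorted]
  rw [max?_id_eq_of_perm (hperm.map _)]

-- ===== VERDICT (by name: the statement is the Claim_ definition above) =====
theorem solution_spec : Claim_equal_solution := by
  intro strArr _ _
  exact solution_eq_alt strArr
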